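-- pv_equiv track=rewrite | github.com/kamilmatuszewski111/CheckiO | One Switch Strings.py | switch_strings
-- ===== SOURCE A (Python) =====
-- def switch_strings(line: str, result: str) -> bool:
--     if line == result:
--         return True
--     elif len(line) != len(result):
--         return False
--
--     first, second = [], []
--     for x, y in zip(line, result):
--         if x != y:
--             first.append(x)
--             second.append(y)
--     if len(first) != 2:
--         return False
--
--     return True if set(first) == set(second) else False
-- ===== SOURCE B (Python) =====
-- def switch_strings(line: str, result: str) -> bool:
--     if line == result:
--         return True
--     if len(line) != len(result):
--         return False
--     i = 0
--     while line[i] == result[i]: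
--         i += 1
--     j = len(line) - 1
--     while line[j] == result[j]:
--         j -= 1
--     if i == j:
--         return False
--     swapped = line[:i] + line[j] + line[i + 1:j] + line[i] + line[j + 1:]
--     return swapped == result
-- ===== Notes on version B (the rewrite author's own statement) =====
-- stated objective: alternative
-- what changed: B finds the first mismatch scanning from the left and the last mismatch scanning from the right, builds the string with those two characters swapped, and compares it to result wholesale, instead of A's single pass collecting the two mismatching character lists and comparing them as sets.
import Mathlib
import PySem

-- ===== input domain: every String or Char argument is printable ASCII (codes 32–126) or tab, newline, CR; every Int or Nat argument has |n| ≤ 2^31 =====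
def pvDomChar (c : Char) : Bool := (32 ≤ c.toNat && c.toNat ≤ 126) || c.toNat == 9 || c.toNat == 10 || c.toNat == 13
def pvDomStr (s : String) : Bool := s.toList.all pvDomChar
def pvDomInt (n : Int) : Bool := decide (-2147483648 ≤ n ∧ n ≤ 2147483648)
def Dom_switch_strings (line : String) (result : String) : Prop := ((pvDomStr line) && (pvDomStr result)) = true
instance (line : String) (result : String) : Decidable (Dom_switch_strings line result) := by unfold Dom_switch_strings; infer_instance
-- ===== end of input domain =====

-- B locates the first mismatch from the left and the last mismatch from the right, builds the
-- string with those two characters swapped and compares it wholesale, instead of A's pass that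
-- collects the mismatching characters and compares them as sets; objective: alternative.

-- ===== PORT A =====
def switch_strings (line : String) (result : String) : Bool :=
  if line == result then true
  else if PySem.Str.len line != PySem.Str.len result then false
  else
    let fs := (line.toList.zip result.toList).foldl
      (fun (st : List Char × List Char) (p : Char × Char) =>
        if p.1 != p.2 then (st.1 ++ [p.1], st.2 ++ [p.2]) else st) ([], [])
    if fs.1.length != 2 then false
    else if PySem.Set.equal (PySem.Set.ofList fs.1) (PySem.Set.ofList fs.2) then true else false

-- ===== PORT B =====
-- 'i = 0; while line[i] == result[i]: i += 1' as the obvious structural recursion (i counts the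
-- equal prefix); the loop terminates in range because line != result with equal lengths.
def eqPrefixLen : List Char → List Char → Nat
  | x :: xs, y :: ys => if x == y then eqPrefixLen xs ys + 1 else 0
  | _, _ => 0

-- 'j = len(line)-1; while line[j] == result[j]: j -= 1' as the obvious recursion on j.
def lastDiff (l r : List Char) : Nat → Nat
  | 0 => 0
  | j + 1 => if l[j+1]? == r[j+1]? then lastDiff l r j else j + 1

def switch_strings_alt (line : String) (result : String) : Bool :=
  if line == result then true
  else if PySem.Str.len line != PySem.Str.len result then false
  else
    let l := line.toList
    let r := result.toList
    let i := eqPrefixLen l r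
    let j := lastDiff l r (l.length - 1)
    if i == j then false
    else
      -- line[:i] + line[j] + line[i+1:j] + line[i] + line[j+1:], slices as take/drop
      -- (= PySem.List.slice with Nat bounds); line[i], line[j] via getD, indices in range
      -- because a mismatch exists (line != result, equal lengths).
      let swapped := l.take i ++ [l.getD j ' '] ++ (l.drop (i+1)).take (j - (i+1))
                      ++ [l.getD i ' '] ++ l.drop (j+1)
      swapped == r

-- ===== PRECONDITION & SPEC =====
def Spec_switch_strings (line : String) (result : String) (out : Bool) : Prop := out = switch_strings_alt line result
instance (line : String) (result : String) (out : Bool) : Decidable (Spec_switch_strings line result out) := by unfold Spec_switch_strings; infer_instance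

-- ===== CLAIM (what is proved, stated in full; the proofs are below) =====
def Claim_equal_switch_strings : Prop := ∀ (line : String) (result : String), Dom_switch_strings line result → Spec_switch_strings line result (switch_strings line result)

-- ===== LEMMAS AND PROOFS =====

-- A's accumulator loop collects the two projections of the mismatching zip pairs.
theorem foldAB (ps : List (Char × Char)) (f s : List Char) :
    ps.foldl (fun (st : List Char × List Char) (p : Char × Char) =>
        if p.1 != p.2 then (st.1 ++ [p.1], st.2 ++ [p.2]) else st) (f, s)
    = (f ++ (ps.filter (fun p => p.1 != p.2)).map Prod.fst,
       s ++ (ps.filter (fun p => p.1 != p.2)).map Prod.snd) := by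
  induction ps generalizing f s with
  | nil => simp
  | cons p ps ih =>
    simp only [List.foldl_cons, List.filter_cons]
    by_cases h : p.1 != p.2
    · rw [if_pos h, ih]; simp [h]
    · rw [if_neg h, ih]; simp [h]

-- the mismatch indices, looked up in both strings, are exactly the mismatch pairs of the zip
theorem diffsChar (l r : List Char) (h : l.length = r.length) :
    ((List.range l.length).filter (fun k => l[k]? != r[k]?)).map (fun k => (l[k]?, r[k]?))
    = ((l.zip r).filter (fun p => p.1 != p.2)).map (fun p => (some p.1, some p.2)) := by
  induction l generalizing r with
  | nil => simp
  | cons x l ih =>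
    cases r with
    | nil => simp at h
    | cons y r =>
      have hlen : l.length = r.length := by simpa using h
      simp only [List.length_cons, List.range_succ_eq_map, List.filter_cons, List.filter_map]
      have hcomp : ((fun k => (x :: l)[k]? != (y :: r)[k]?) ∘ Nat.succ)
          = fun k => l[k]? != r[k]? := by
        funext k; simp [Function.comp, Nat.succ_eq_add_one]
      rw [hcomp]
      by_cases hxy : x = y
      · simp [hxy, List.map_map, Function.comp_def, Nat.succ_eq_add_one, ih r hlen]
      · simp [hxy, List.map_map, Function.comp_def, Nat.succ_eq_add_one, ih r hlen]

-- with the two mismatch pairs (a,c) and (b,d), A's set test is the positional swap test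
theorem setEqIff (a c b d : Char) (hac : a ≠ c) (hbd : b ≠ d) :
    PySem.Set.equal (PySem.Set.ofList [a, b]) (PySem.Set.ofList [c, d])
      = ((a == d) && (b == c)) := by
  by_cases had : a = d <;> by_cases hbc : b = c
  · subst had; subst hbc
    simp only [BEq.rfl, Bool.and_self]
    rw [PySem.Set.equal_iff]
    intro x
    simp only [PySem.Set.mem_ofList, List.mem_cons, List.not_mem_nil]
    tauto
  · have h2 : (b == c) = false := by simpa using hbc
    simp only [h2, Bool.and_false, Bool.eq_false_iff, ne_eq]
    intro hEq
    rw [PySem.Set.equal_iff] at hEq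
    have hb := hEq b
    simp only [PySem.Set.mem_ofList, List.mem_cons, List.not_mem_nil] at hb
    have := hb.mp (by tauto)
    tauto
  · have h1 : (a == d) = false := by simpa using had
    simp only [h1, Bool.false_and, Bool.eq_false_iff, ne_eq]
    intro hEq
    rw [PySem.Set.equal_iff] at hEq
    have ha := hEq a
    simp only [PySem.Set.mem_ofList, List.mem_cons, List.not_mem_nil] at ha
    have := ha.mp (by tauto)
    tauto
  · have h1 : (a == d) = false := by simpa using had
    simp only [h1, Bool.false_and, Bool.eq_false_iff, ne_eq]
    intro hEq
    rw [PySem.Set.equal_iff] at hEq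
    have ha := hEq a
    simp only [PySem.Set.mem_ofList, List.mem_cons, List.not_mem_nil] at ha
    have := ha.mp (by tauto)
    tauto

-- the forward scan stops at the FIRST mismatch
theorem eqPrefixLen_spec (l : List Char) : ∀ (r : List Char), l.length = r.length → l ≠ r →
    eqPrefixLen l r < l.length ∧ l[eqPrefixLen l r]? ≠ r[eqPrefixLen l r]? ∧
      ∀ k, k < eqPrefixLen l r → l[k]? = r[k]? := by
  induction l with
  | nil =>
    intro r hlen hne
    cases r with
    | nil => exact absurd rfl hne
    | cons y ys => simp at hlen
  | cons x xs ih =>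
    intro r hlen hne
    cases r with
    | nil => simp at hlen
    | cons y ys =>
      by_cases hxy : x = y
      · subst hxy
        have hxs : xs ≠ ys := fun h => hne (by rw [h])
        obtain ⟨h1, h2, h3⟩ := ih ys (by simpa using hlen) hxs
        refine ⟨?_, ?_, ?_⟩
        · simp [eqPrefixLen, Nat.succ_lt_succ h1]
        · simpa [eqPrefixLen] using h2
        · intro k hk
          simp only [eqPrefixLen, if_pos (by simp : (x == x) = true)] at hk
          cases k with
          | zero => simp
          | succ k => simpa using h3 k (by omega)
      · refine ⟨by simp [eqPrefixLen, hxy], by simp [eqPrefixLen, hxy], ?_⟩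
        intro k hk
        simp [eqPrefixLen, hxy] at hk

-- the backward scan stops at the LAST mismatch at or below its start index
theorem lastDiff_spec (l r : List Char) : ∀ (m : Nat), (∃ t, t ≤ m ∧ l[t]? ≠ r[t]?) →
    lastDiff l r m ≤ m ∧ l[lastDiff l r m]? ≠ r[lastDiff l r m]? ∧
      ∀ k, lastDiff l r m < k → k ≤ m → l[k]? = r[k]? := by
  intro m
  induction m with
  | zero =>
    intro ⟨t, ht, hmt⟩
    have : t = 0 := by omega
    subst this
    exact ⟨le_refl _, by simpa [lastDiff] using hmt, fun k h1 h2 => by omega⟩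
  | succ m ih =>
    intro ⟨t, ht, hmt⟩
    by_cases he : l[m+1]? = r[m+1]?
    · have hbeq : (l[m+1]? == r[m+1]?) = true := by simp [he]
      have ht' : t ≤ m := by
        rcases Nat.lt_or_ge t (m+1) with h | h
        · omega
        · exfalso; have htt : t = m + 1 := by omega
          rw [htt] at hmt; exact hmt he
      obtain ⟨h1, h2, h3⟩ := ih ⟨t, ht', hmt⟩
      refine ⟨?_, ?_, ?_⟩
      · simp only [lastDiff, hbeq, if_pos]; omega
      · simpa [lastDiff, hbeq] using h2
      · intro k hk1 hk2
        simp only [lastDiff, hbeq, if_pos] at hk1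
        rcases Nat.lt_or_ge k (m+1) with h | h
        · exact h3 k hk1 (by omega)
        · have : k = m + 1 := by omega
          rw [this]; exact he
    · have hbeq : (l[m+1]? == r[m+1]?) = false := by simpa using he
      refine ⟨?_, ?_, ?_⟩
      · simp [lastDiff, hbeq]
      · simpa [lastDiff, hbeq] using he
      · intro k hk1 hk2
        rw [lastDiff, hbeq] at hk1
        simp only [Bool.false_eq_true, if_false] at hk1
        omega

-- splitting a list at two interior positions
theorem decomp (z : List Char) (d : Char) (i j : Nat) (hij : i < j) (hj : j < z.length) :
    z = z.take i ++ [z.getD i d] ++ (z.drop (i+1)).take (j-(i+1)) ++ [z.getD j d]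
          ++ z.drop (j+1) := by
  have hi : i < z.length := by omega
  have h1 : z.drop i = z.getD i d :: z.drop (i+1) := by
    rw [List.drop_eq_getElem_cons hi, List.getD_eq_getElem z d hi]
  have h2 : z.drop (i+1) = (z.drop (i+1)).take (j-(i+1)) ++ z.drop j := by
    conv_lhs => rw [← List.take_append_drop (j-(i+1)) (z.drop (i+1))]
    rw [List.drop_drop]
    congr 2
    omega
  have h4 : z.drop j = z.getD j d :: z.drop (j+1) := by
    rw [List.drop_eq_getElem_cons hj, List.getD_eq_getElem z d hj]
  conv_rhs => rw [List.append_assoc, List.append_assoc, List.append_assoc,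
    List.singleton_append, List.singleton_append, ← h4, ← h2, ← h1, List.take_append_drop]

-- equal-length components of a five-way concatenation match up
theorem app5 (a b c e f a' b' c' e' f' : List Char) (h1 : a.length = a'.length)
    (h2 : b.length = b'.length) (h3 : c.length = c'.length) (h4 : e.length = e'.length) :
    (a ++ b ++ c ++ e ++ f = a' ++ b' ++ c' ++ e' ++ f')
    ↔ (a = a' ∧ b = b' ∧ c = c' ∧ e = e' ∧ f = f') := by
  constructor
  · intro h
    obtain ⟨h', hf⟩ := List.append_inj h (by simp [h1, h2, h3, h4])
    obtain ⟨h'', he⟩ := List.append_inj h' (by simp [h1, h2, h3])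
    obtain ⟨h''', hc⟩ := List.append_inj h'' (by simp [h1, h2])
    obtain ⟨ha, hb⟩ := List.append_inj h''' h1
    exact ⟨ha, hb, hc, he, hf⟩
  · rintro ⟨ha, hb, hc, he, hf⟩
    rw [ha, hb, hc, he, hf]

-- the swapped string equals result iff the two swapped positions cross-match and
-- everything strictly between them already matched
theorem swapped_eq_iff (l r : List Char) (i j : Nat) (hij : i < j) (hj : j < l.length)
    (hlen : l.length = r.length)
    (hpre : ∀ k, k < i → l[k]? = r[k]?)
    (hsuf : ∀ k, j < k → k < l.length → l[k]? = r[k]?) :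
    (l.take i ++ [l.getD j ' '] ++ (l.drop (i+1)).take (j-(i+1)) ++ [l.getD i ' ']
        ++ l.drop (j+1) = r)
    ↔ (l[i]? = r[j]? ∧ l[j]? = r[i]? ∧ ∀ k, i < k → k < j → l[k]? = r[k]?) := by
  have hi : i < l.length := by omega
  have hir : i < r.length := by omega
  have hjr : j < r.length := by omega
  have hr := decomp r ' ' i j hij hjr
  have htake : l.take i = r.take i := by
    apply List.ext_getElem?
    intro k
    rw [List.getElem?_take, List.getElem?_take]
    split_ifs with h
    · exact hpre k h
    · rfl
  have hdrop : l.drop (j+1) = r.drop (j+1) := by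
    apply List.ext_getElem?
    intro k
    rw [List.getElem?_drop, List.getElem?_drop]
    by_cases h : j + 1 + k < l.length
    · exact hsuf (j+1+k) (by omega) h
    · rw [List.getElem?_eq_none (by omega), List.getElem?_eq_none (by omega)]
  have hmidlen : ((l.drop (i+1)).take (j-(i+1))).length = j - (i+1) := by
    simp; omega
  have hmidlen' : ((r.drop (i+1)).take (j-(i+1))).length = j - (i+1) := by
    simp; omega
  have hsingle : ∀ (x : List Char) (a : Nat) (ha : a < x.length) (y : List Char) (b : Nat)
      (hb : b < y.length), ([x.getD a ' '] = [y.getD b ' ']) ↔ x[a]? = y[b]? := by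
    intro x a ha y b hb
    rw [List.getD_eq_getElem x ' ' ha, List.getD_eq_getElem y ' ' hb,
      List.getElem?_eq_getElem ha, List.getElem?_eq_getElem hb]
    simp
  have hmid : ((l.drop (i+1)).take (j-(i+1)) = (r.drop (i+1)).take (j-(i+1)))
      ↔ (∀ k, i < k → k < j → l[k]? = r[k]?) := by
    constructor
    · intro h k hk1 hk2
      have := congrArg (fun t => t[k - (i+1)]?) h
      simpa [List.getElem?_take, List.getElem?_drop, show k - (i+1) < j - (i+1) by omega,
        show i + 1 + (k - (i+1)) = k by omega] using this
    · intro h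
      apply List.ext_getElem?
      intro k
      rw [List.getElem?_take, List.getElem?_take]
      split_ifs with hk
      · rw [List.getElem?_drop, List.getElem?_drop]
        exact h (i+1+k) (by omega) (by omega)
      · rfl
  constructor
  · intro h
    rw [hr] at h
    rw [app5 _ _ _ _ _ _ _ _ _ _ (by simp [hlen]) (by simp) (by rw [hmidlen, hmidlen']) (by simp)] at h
    obtain ⟨-, hbj, hc, hei, -⟩ := h
    exact ⟨(hsingle l i hi r j hjr).mp hei, (hsingle l j hj r i hir).mp hbj, hmid.mp hc⟩
  · rintro ⟨hij1, hij2, hmid'⟩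
    rw [hr]
    rw [app5 _ _ _ _ _ _ _ _ _ _ (by simp [hlen]) (by simp) (by rw [hmidlen, hmidlen']) (by simp)]
    exact ⟨htake, (hsingle l j hj r i hir).mpr hij2, hmid.mpr hmid',
      (hsingle l i hi r j hjr).mpr hij1, hdrop⟩

-- B's else-branch, characterised by the list of mismatch indices
theorem B_else (l r : List Char) (hlen : l.length = r.length) (hne : l ≠ r) :
    (if eqPrefixLen l r == lastDiff l r (l.length - 1) then false
     else
      (l.take (eqPrefixLen l r) ++ [l.getD (lastDiff l r (l.length - 1)) ' ']
        ++ (l.drop (eqPrefixLen l r + 1)).take (lastDiff l r (l.length - 1) - (eqPrefixLen l r + 1))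
        ++ [l.getD (eqPrefixLen l r) ' '] ++ l.drop (lastDiff l r (l.length - 1) + 1)) == r)
    = match (List.range l.length).filter (fun k => l[k]? != r[k]?) with
      | [a, b] => (l[a]? == r[b]?) && (l[b]? == r[a]?)
      | _ => false := by
  set i := eqPrefixLen l r with hidef
  set j := lastDiff l r (l.length - 1) with hjdef
  obtain ⟨hi, hmi, hpre⟩ := eqPrefixLen_spec l r hlen hne
  obtain ⟨hj1, hmj, hsuf'⟩ := lastDiff_spec l r (l.length - 1) ⟨i, by omega, hmi⟩
  have hj : j < l.length := by omega
  have hsuf : ∀ k, j < k → k < l.length → l[k]? = r[k]? := fun k h1 h2 => hsuf' k h1 (by omega)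
  set D := (List.range l.length).filter (fun k => l[k]? != r[k]?) with hDdef
  have hmem : ∀ k, k ∈ D ↔ (k < l.length ∧ l[k]? ≠ r[k]?) := by
    intro k
    simp [hDdef, List.mem_filter, List.mem_range]
  have hiD : i ∈ D := (hmem i).mpr ⟨hi, hmi⟩
  have hjD : j ∈ D := (hmem j).mpr ⟨hj, hmj⟩
  have hmin : ∀ k, k ∈ D → i ≤ k := by
    intro k hk
    by_contra h
    exact ((hmem k).mp hk).2 (hpre k (by omega))
  have hmax : ∀ k, k ∈ D → k ≤ j := by
    intro k hk
    by_contra h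
    exact ((hmem k).mp hk).2 (hsuf k (by omega) ((hmem k).mp hk).1)
  have hpair : D.Pairwise (· < ·) := List.Pairwise.filter _ List.pairwise_lt_range
  rcases hD : D with _ | ⟨a, _ | ⟨b, _ | ⟨c, tl⟩⟩⟩ <;> rw [hD] at hiD hjD hmin hmax hpair
  · simp at hiD
  · -- single mismatch: i = j = a
    have hia : i = a := by simpa using hiD
    have hja : j = a := by simpa using hjD
    rw [if_pos (by simp [hia, hja])]
  · -- exactly two mismatches a < b: i = a, j = b
    have hab : a < b := by
      have := List.pairwise_cons.mp hpair
      simpa using this.1 b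
    have hia : i = a := by
      rcases (by simpa using hiD : i = a ∨ i = b) with h | h
      · exact h
      · have := hmin a (by simp); omega
    have hjb : j = b := by
      rcases (by simpa using hjD : j = a ∨ j = b) with h | h
      · have := hmax b (by simp); omega
      · exact h
    have hijlt : i < j := by omega
    rw [if_neg (by simp; omega)]
    have hmid : ∀ k, i < k → k < j → l[k]? = r[k]? := by
      intro k h1 h2
      by_contra hk
      have : k ∈ D := (hmem k).mpr ⟨by omega, hk⟩
      rw [hD] at this
      simp at this
      omega
    have hiff := swapped_eq_iff l r i j hijlt hj hlen hpre hsuf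
    by_cases hsw : l.take i ++ [l.getD j ' '] ++ (l.drop (i+1)).take (j-(i+1))
        ++ [l.getD i ' '] ++ l.drop (j+1) = r
    · obtain ⟨c1, c2, -⟩ := hiff.mp hsw
      rw [hia, hjb] at c1 c2
      rw [beq_iff_eq.mpr hsw]
      simp [c1, c2]
    · rw [beq_false_of_ne hsw]
      have := fun c1 c2 => hsw (hiff.mpr ⟨c1, c2, hmid⟩)
      by_cases c1 : l[i]? = r[j]?
      · have c2 := this c1
        rw [hia, hjb] at c1 c2
        simp [c1]
        simpa using c2
      · rw [hia, hjb] at c1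
        simp [beq_false_of_ne c1]
  · -- three or more mismatches: the middle one spoils the swap
    have hab : a < b ∧ b < c := by
      have h1 := List.pairwise_cons.mp hpair
      have h2 := List.pairwise_cons.mp h1.2
      constructor
      · simpa using h1.1 b (by simp)
      · simpa using h2.1 c (by simp)
    have hia : i = a := by
      have h1 := hmin a (by simp)
      rcases (by simpa using hiD : i = a ∨ i = b ∨ i = c ∨ i ∈ tl) with h | h | h | h
      · exact h
      · omega
      · omega
      · have := List.pairwise_cons.mp hpair
        have := (List.pairwise_cons.mp (List.pairwise_cons.mp hpair).2).1
        exfalso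
        have hac := (List.pairwise_cons.mp hpair).1 i (by simp [h])
        omega
    have hcj : c ≤ j := hmax c (by simp)
    have hbD : b ∈ D := by rw [hD]; simp
    have hblt : i < b ∧ b < j := by omega
    have hijlt : i < j := by omega
    rw [if_neg (by simp; omega)]
    have hiff := swapped_eq_iff l r i j hijlt hj hlen hpre hsuf
    have hsw : ¬ (l.take i ++ [l.getD j ' '] ++ (l.drop (i+1)).take (j-(i+1))
        ++ [l.getD i ' '] ++ l.drop (j+1) = r) := by
      intro h
      obtain ⟨-, -, hmid⟩ := hiff.mp h
      exact ((hmem b).mp hbD).2 (hmid b hblt.1 hblt.2)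
    rw [beq_false_of_ne hsw]

-- ===== VERDICT (by name: the statement is the Claim_ definition above) =====
theorem switch_strings_spec : Claim_equal_switch_strings := by
  intro line result _
  unfold Spec_switch_strings switch_strings switch_strings_alt
  by_cases heq : line == result
  · rw [if_pos heq, if_pos heq]
  · by_cases hlen : PySem.Str.len line != PySem.Str.len result
    · rw [if_neg heq, if_neg heq, if_pos hlen, if_pos hlen]
    · rw [if_neg heq, if_neg heq, if_neg hlen, if_neg hlen]
      have hlenn : line.toList.length = result.toList.length := by
        have h1 : line.toList.length = line.length := by simp
        have h2 : result.toList.length = result.length := by simp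
        rw [h1, h2]
        simpa [bne, PySem.Str.len] using hlen
      have hnel : line.toList ≠ result.toList := by
        intro h
        exact heq (by simpa using String.toList_inj.mp h)
      -- A-side: reduce to the match over the mismatch indices
      simp only [foldAB, List.nil_append]
      rw [B_else line.toList result.toList hlenn hnel]
      set m := (line.toList.zip result.toList).filter (fun p => p.1 != p.2) with hmdef
      set nd := (List.range line.toList.length).filter
        (fun k => line.toList[k]? != result.toList[k]?) with hnddef
      have hd : nd.map (fun k => (line.toList[k]?, result.toList[k]?))
          = m.map (fun p => (some p.1, some p.2)) := diffsChar _ _ hlenn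
      have hL : nd.length = m.length := by
        have := congrArg List.length hd; simpa using this
      rcases hnd : nd with _ | ⟨k1, _ | ⟨k2, _ | ⟨k3, rest⟩⟩⟩ <;> rw [hnd] at hd hL
      · rcases m with _ | ⟨p, ms⟩
        · simp
        · simp at hL
      · rcases m with _ | ⟨p, _ | ⟨q, ms⟩⟩
        · simp at hL
        · simp
        · simp at hL
      · rcases m with _ | ⟨p, _ | ⟨q, _ | ⟨w, ms⟩⟩⟩
        · simp at hL
        · simp at hL
        · simp only [List.map_cons, List.map_nil, List.cons.injEq, Prod.mk.injEq] at hd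
          obtain ⟨⟨h1a, h1c⟩, ⟨h2b, h2d⟩, -⟩ := hd
          have hp : p ∈ (line.toList.zip result.toList).filter (fun p => p.1 != p.2) := by
            rw [← hmdef]; simp
          have hq : q ∈ (line.toList.zip result.toList).filter (fun p => p.1 != p.2) := by
            rw [← hmdef]; simp
          have hpne : p.1 ≠ p.2 := by
            have := (List.mem_filter.mp hp).2; simpa using this
          have hqne : q.1 ≠ q.2 := by
            have := (List.mem_filter.mp hq).2; simpa using this
          simp only [List.map_cons, List.map_nil]
          simp only [setEqIff p.1 p.2 q.1 q.2 hpne hqne]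
          simp only [h1a, h1c, h2b, h2d]
          by_cases e1 : p.1 = q.2 <;> by_cases e2 : q.1 = p.2 <;> simp [e1, e2]
        · simp at hL
      · rcases m with _ | ⟨p, _ | ⟨q, _ | ⟨w, ms⟩⟩⟩
        · simp at hL
        · simp at hL
        · simp at hL
        · simp
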